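-- pv_equiv track=rewrite | github.com/TheCDC/Playground | aaron_renfroe-2018-01-09/main.py | num_groups
-- ===== SOURCE A (Python) =====
-- def num_groups(l):
--     c = 0
--     state = 0
--     for i in l:
--         if state == 0:
--             if i == 0:
--                 pass
--             elif i == 1:
--                 state = 1
--                 c += 1
--         elif state == 1:
--             if i == 0:
--                 state = 0
--             elif i == 1:
--                 pass
--     return c
-- ===== SOURCE B (Python) =====
-- def num_groups(l):
--     bits = [i for i in l if i == 0 or i == 1]
--
--     def count(xs):
--         # divide and conquer: runs(left ++ right) = runs(left) + runs(right),
--         # minus 1 when a single run of 1s spans the cut point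
--         if len(xs) <= 1:
--             return 1 if xs == [1] else 0
--         m = len(xs) // 2
--         left, right = xs[:m], xs[m:]
--         c = count(left) + count(right)
--         if left[-1] == 1 and right[0] == 1:
--             c -= 1
--         return c
--
--     return count(bits)
-- ===== Notes on version B (the rewrite author's own statement) =====
-- stated objective: alternative
-- what changed: Replaces A's linear two-state machine with a two-phase divide-and-conquer: filter to the 0/1 elements, then recursively halve the list, counting runs of 1s in each half and subtracting 1 when a run spans the cut.
import Mathlib
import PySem

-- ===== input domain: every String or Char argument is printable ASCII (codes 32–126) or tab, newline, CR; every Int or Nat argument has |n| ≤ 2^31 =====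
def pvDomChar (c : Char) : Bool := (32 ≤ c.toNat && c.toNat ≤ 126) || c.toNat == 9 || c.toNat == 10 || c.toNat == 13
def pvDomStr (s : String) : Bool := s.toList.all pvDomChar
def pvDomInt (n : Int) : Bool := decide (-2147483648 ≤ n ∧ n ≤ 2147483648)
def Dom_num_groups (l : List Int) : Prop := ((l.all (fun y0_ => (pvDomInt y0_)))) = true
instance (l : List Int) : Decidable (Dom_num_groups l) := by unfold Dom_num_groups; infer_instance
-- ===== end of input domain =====

-- B replaces A's inline two-state machine by filter + divide-and-conquer run counting (alternative algorithm); return values proved equal.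

-- ===== PORT A =====
-- A's loop: state machine over (c, state), transliterated branch for branch.
def ngLoop : List Int → Int → Int → Int
  | [], c, _ => c
  | i :: t, c, state =>
    if state = 0 then
      if i = 0 then ngLoop t c state
      else if i = 1 then ngLoop t (c + 1) 1
      else ngLoop t c state
    else if state = 1 then
      if i = 0 then ngLoop t c 0
      else if i = 1 then ngLoop t c state
      else ngLoop t c state
    else ngLoop t c state

def num_groups (l : List Int) : Int := ngLoop l 0 0

-- ===== PORT B =====
-- Source B's inner 'count': halve, count runs in each half, subtract 1 if a run of 1s spans the cut.
-- xs[:m] / xs[m:] with 0 ≤ m ≤ len(xs) are exactly List.take m / List.drop m;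
-- left[-1] / right[0] are PySem.List.pyGet? left (-1) / pyGet? right 0.
def countDC (xs : List Int) : Int :=
  if h : xs.length ≤ 1 then (if xs = [1] then 1 else 0)
  else
    let m := xs.length / 2
    let left := xs.take m
    let right := xs.drop m
    let c := countDC left + countDC right
    if PySem.List.pyGet? left (-1) = some 1 ∧ PySem.List.pyGet? right 0 = some 1 then
      c - 1
    else c
termination_by xs.length
decreasing_by
  · simp [left]; omega
  · simp [right]; omega

-- Source B: bits = [i for i in l if i == 0 or i == 1]; return count(bits)
def num_groups_alt (l : List Int) : Int :=
  countDC (l.filter (fun i => i == 0 || i == 1))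

-- ===== PRECONDITION & SPEC =====
def Spec_num_groups (l : List Int) (out : Int) : Prop := out = num_groups_alt l
instance (l : List Int) (out : Int) : Decidable (Spec_num_groups l out) := by unfold Spec_num_groups; infer_instance

-- ===== CLAIM (what is proved, stated in full; the proofs are below) =====
def Claim_equal_num_groups : Prop := ∀ (l : List Int), Dom_num_groups l → Spec_num_groups l (num_groups l)

-- ===== LEMMAS AND PROOFS =====

-- number of 0→1 rising edges in f, seeded with previous element s: the common characterisation
def edgeCount (s : Int) (f : List Int) : Int :=
  ((List.zip (s :: f) f).filter (fun p => p.1 == 0 && p.2 == 1)).length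

theorem edgeCount_nil (s : Int) : edgeCount s [] = 0 := by simp [edgeCount]

theorem edgeCount_cons (s b : Int) (t : List Int) :
    edgeCount s (b :: t) = (if s = 0 ∧ b = 1 then 1 else 0) + edgeCount b t := by
  by_cases h : s = 0 ∧ b = 1
  · obtain ⟨h1, h2⟩ := h; subst h1; subst h2
    simp [edgeCount, List.zip_cons_cons]
    omega
  · have hb : (s == 0 && b == 1) = false := by
      rcases not_and_or.mp h with h' | h' <;> simp [h']
    simp [edgeCount, List.zip_cons_cons, hb, h]

-- A's state machine computes the rising-edge count of the filtered stream
theorem ngLoop_eq (l : List Int) : ∀ (c s : Int), s = 0 ∨ s = 1 →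
    ngLoop l c s = c + edgeCount s (l.filter (fun i => i == 0 || i == 1)) := by
  induction l with
  | nil => intro c s _; simp [ngLoop, edgeCount_nil]
  | cons i t ih =>
    intro c s hs
    by_cases hi0 : i = 0
    · subst hi0
      rcases hs with h | h <;> subst h <;>
        simp [ngLoop, edgeCount_cons, ih _ _ (Or.inl rfl)]
    · by_cases hi1 : i = 1
      · subst hi1
        rcases hs with h | h <;> subst h <;>
          simp [ngLoop, edgeCount_cons, ih _ _ (Or.inr rfl)] <;> omega
      · rcases hs with h | h <;> subst h <;>
          simp [ngLoop, hi0, hi1, ih _ _ (by omega : (0:Int) = 0 ∨ (0:Int) = 1),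
            ih _ _ (by omega : (1:Int) = 0 ∨ (1:Int) = 1)]

theorem edgeCount_append (xs : List Int) : ∀ (s : Int) (ys : List Int),
    edgeCount s (xs ++ ys) = edgeCount s xs + edgeCount (xs.getLastD s) ys := by
  induction xs with
  | nil => intro s ys; simp [edgeCount_nil]
  | cons a t ih =>
    intro s ys
    simp only [List.cons_append, edgeCount_cons, ih a ys, List.getLastD_cons]
    omega

-- reseeding: an edge count seeded with 1 loses exactly the leading edge
theorem edgeCount_seed_one (ys : List Int) :
    edgeCount 1 ys = edgeCount 0 ys - (if ys.head? = some 1 then 1 else 0) := by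
  cases ys with
  | nil => simp [edgeCount_nil]
  | cons b t =>
    by_cases hb : b = 1 <;> simp [edgeCount_cons, hb] <;> omega

theorem pyGet?_neg_one (xs : List Int) (h : xs ≠ []) :
    PySem.List.pyGet? xs (-1) = xs.getLast? := by
  have hl : 1 ≤ xs.length := List.length_pos_iff.mpr h
  simp [PySem.List.pyGet?, PySem.List.pyIdx?, List.getLast?_eq_getElem?, hl]

theorem pyGet?_zero (xs : List Int) :
    PySem.List.pyGet? xs 0 = xs.head? := by
  cases xs <;> simp [PySem.List.pyGet?, PySem.List.pyIdx?]

-- the divide-and-conquer count equals the rising-edge count on binary lists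
theorem countDC_eq (n : Nat) : ∀ (xs : List Int), xs.length = n →
    (∀ i ∈ xs, i = 0 ∨ i = 1) → countDC xs = edgeCount 0 xs := by
  induction n using Nat.strong_induction_on with
  | _ n ih =>
    intro xs hn hbin
    by_cases h1 : xs.length ≤ 1
    · rw [countDC, dif_pos h1]
      match xs, h1 with
      | [], _ => simp [edgeCount_nil]
      | [b], _ =>
        rcases hbin b (by simp) with hb | hb <;> subst hb <;>
          simp [edgeCount_cons, edgeCount_nil]
    · rw [countDC, dif_neg h1]
      simp only []
      set m := xs.length / 2 with hm
      have hm1 : 1 ≤ m := by omega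
      have hmlt : m < xs.length := by omega
      have hL : (xs.take m).length = m := by simp; omega
      have hR : (xs.drop m).length = xs.length - m := by simp
      have hLne : xs.take m ≠ [] := by
        intro h; rw [h] at hL; simp at hL; omega
      have hbinL : ∀ i ∈ xs.take m, i = 0 ∨ i = 1 :=
        fun i hi => hbin i (List.mem_of_mem_take hi)
      have hbinR : ∀ i ∈ xs.drop m, i = 0 ∨ i = 1 :=
        fun i hi => hbin i (List.mem_of_mem_drop hi)
      have ihL := ih m (by omega) (xs.take m) hL hbinL
      have ihR := ih (xs.length - m) (by omega) (xs.drop m) hR hbinR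
      have happ : edgeCount 0 xs
          = edgeCount 0 (xs.take m) + edgeCount ((xs.take m).getLastD 0) (xs.drop m) := by
        conv_lhs => rw [(List.take_append_drop m xs).symm]
        exact edgeCount_append _ _ _
      have hlast : (xs.take m).getLast? = some ((xs.take m).getLastD 0) := by
        cases hgl : (xs.take m).getLast? with
        | none => exact absurd (List.getLast?_eq_none_iff.mp hgl) hLne
        | some a => simp [List.getLastD_eq_getLast?, hgl]
      have hlastbin : (xs.take m).getLastD 0 = 0 ∨ (xs.take m).getLastD 0 = 1 := by
        have hmem : (xs.take m).getLastD 0 ∈ (0:Int) :: xs.take m := List.getLastD_mem_cons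
        rcases List.mem_cons.mp hmem with h | h
        · left; exact h
        · exact hbinL _ h
      rw [pyGet?_neg_one _ hLne, pyGet?_zero, ihL, ihR, hlast, happ]
      rcases hlastbin with h0 | h0 <;> rw [h0]
      · simp
      · rw [edgeCount_seed_one]
        by_cases hh : (xs.drop m).head? = some 1
        · rw [if_pos ⟨rfl, hh⟩, if_pos hh]; ring
        · rw [if_neg (fun hc => hh hc.2), if_neg hh]; ring

-- ===== VERDICT (by name: the statement is the Claim_ definition above) =====
theorem num_groups_spec : Claim_equal_num_groups := by
  intro l _
  show num_groups l = num_groups_alt l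
  rw [num_groups, num_groups_alt, ngLoop_eq l 0 0 (Or.inl rfl),
    countDC_eq _ _ rfl (by intro i hi; have := (List.mem_filter.mp hi).2; simp at this; tauto)]
  omega
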